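-- pv_equiv track=rewrite | github.com/wtain/LeetCodePython | DataStructures/Basic/Arrays/Aggregations/CumulativeSum/SumOfAllOddLengthSubarrays.py | sumOddLengthSubarrays
-- ===== SOURCE A (Python) =====
-- from functools import reduce
-- from itertools import product
-- from typing import List
--
-- def sumOddLengthSubarrays(arr: List[int]) -> int:
--     n = len(arr)
--     cs = reduce(lambda res, v: (res[0] + [res[1] + v], res[1] + v), arr, ([], 0))[0]
--     return sum(
--         cs[j] - (cs[i-1] if i > 0 else 0)
--         for i, j in product(range(n), range(n))
--         if j >= i and (j-i+1) % 2
--     )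
-- ===== SOURCE B (Python) =====
-- from typing import List
--
-- def sumOddLengthSubarrays(arr: List[int]) -> int:
--     n = len(arr)
--     total = 0
--     for i, v in enumerate(arr):
--         total += v * (((i + 1) * (n - i) + 1) // 2)
--     return total
-- ===== Notes on version B (the rewrite author's own statement) =====
-- stated objective: faster
-- what changed: Replaced the quadratic enumeration of all odd-length subarrays (via prefix sums over a cartesian product of indices) by a single pass that adds each element times its closed-form count of odd-length subarrays containing it, ((i+1)*(n-i)+1)//2.
import Mathlib
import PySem

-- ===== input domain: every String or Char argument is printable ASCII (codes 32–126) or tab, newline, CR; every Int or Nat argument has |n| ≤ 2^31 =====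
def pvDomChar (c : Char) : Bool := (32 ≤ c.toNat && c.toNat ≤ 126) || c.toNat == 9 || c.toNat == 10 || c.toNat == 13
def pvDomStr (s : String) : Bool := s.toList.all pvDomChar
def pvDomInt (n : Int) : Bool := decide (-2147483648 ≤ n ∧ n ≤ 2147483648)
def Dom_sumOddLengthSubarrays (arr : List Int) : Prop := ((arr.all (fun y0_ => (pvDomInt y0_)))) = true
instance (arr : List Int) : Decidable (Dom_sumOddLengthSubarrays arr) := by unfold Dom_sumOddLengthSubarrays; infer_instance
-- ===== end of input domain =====

-- B replaces A's quadratic enumeration of all odd-length subarrays (prefix sums over a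
-- product of index ranges) by a single pass using each element's closed-form contribution
-- count ((i+1)*(n-i)+1)//2; a timing run measures the asymptotic speed-up.

-- ===== PORT A =====
def sumOddLengthSubarrays (arr : List Int) : Int :=
  let n : Int := arr.length
  let cs : List Int :=
    (arr.foldl (fun res v => (res.1 ++ [res.2 + v], res.2 + v)) (([] : List Int), (0 : Int))).1
  (((PySem.List.pyRange 0 n 1).flatMap
      (fun i => (PySem.List.pyRange 0 n 1).map (fun j => (i, j)))).foldl
    (fun acc p =>
      if p.2 ≥ p.1 ∧ PySem.Int.mod (p.2 - p.1 + 1) 2 ≠ 0 then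
        acc + (PySem.List.pyGetD cs p.2 0 -
                (if p.1 > 0 then PySem.List.pyGetD cs (p.1 - 1) 0 else 0))
      else acc) 0)

-- ===== PORT B =====
def sumOddLengthSubarrays_alt (arr : List Int) : Int :=
  let n : Int := arr.length
  (PySem.List.enumerate arr 0).foldl
    (fun total iv => total + iv.2 * PySem.Int.floordiv ((iv.1 + 1) * (n - iv.1) + 1) 2) 0

-- ===== PRECONDITION & SPEC =====
def Spec_sumOddLengthSubarrays (arr : List Int) (out : Int) : Prop := out = sumOddLengthSubarrays_alt arr
instance (arr : List Int) (out : Int) : Decidable (Spec_sumOddLengthSubarrays arr out) := by unfold Spec_sumOddLengthSubarrays; infer_instance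

-- ===== CLAIM (what is proved, stated in full; the proofs are below) =====
def Claim_equal_sumOddLengthSubarrays : Prop := ∀ (arr : List Int), Dom_sumOddLengthSubarrays arr → Spec_sumOddLengthSubarrays arr (sumOddLengthSubarrays arr)

-- ===== LEMMAS AND PROOFS =====

-- abbreviation for the proofs: element access
def pvA (arr : List Int) (k : Nat) : Int := arr.getD k 0

-- sum of a mapped range as a Finset sum
theorem pv_sum_map_range (f : Nat → Int) (m : Nat) :
    ((List.range m).map f).sum = ∑ k ∈ Finset.range m, f k := by
  induction m with
  | zero => simp
  | succ m ih => simp [List.range_succ, Finset.sum_range_succ, ih]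

-- prefix sums: take-sum as a Finset sum
theorem pv_take_sum (arr : List Int) (m : Nat) :
    (arr.take m).sum = ∑ k ∈ Finset.range m, pvA arr k := by
  induction m with
  | zero => simp
  | succ m ih =>
    rw [List.take_succ, List.sum_append, ih, Finset.sum_range_succ]
    congr 1
    cases h : arr[m]? with
    | none => simp [pvA, List.getD, h]
    | some x => simp [pvA, List.getD, h]

-- the reduce in A builds the list of prefix sums
theorem pv_cs_eq (arr : List Int) : ∀ (l : List Int) (s : Int),
    (arr.foldl (fun res v => (res.1 ++ [res.2 + v], res.2 + v)) (l, s)).1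
      = l ++ (List.range arr.length).map (fun k => s + (arr.take (k + 1)).sum) := by
  induction arr with
  | nil => intro l s; simp
  | cons v t ih =>
    intro l s
    simp only [List.foldl_cons, ih (l ++ [s + v]) (s + v), List.length_cons,
      List.range_succ_eq_map, List.map_cons, List.map_map]
    simp [List.append_assoc, Function.comp, add_assoc]

-- evens and odds below m
theorem pv_ev (m : Nat) : (∑ i ∈ Finset.range m, if i % 2 = 0 then (1 : Nat) else 0) = (m + 1) / 2 := by
  induction m with
  | zero => simp
  | succ m ih => rw [Finset.sum_range_succ, ih]; split_ifs with h <;> omega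

theorem pv_od (m : Nat) : (∑ i ∈ Finset.range m, if i % 2 = 1 then (1 : Nat) else 0) = m / 2 := by
  induction m with
  | zero => simp
  | succ m ih => rw [Finset.sum_range_succ, ih]; split_ifs with h <;> omega

-- truncation: a sum guarded by i ≤ k over range n equals the sum over range (k+1)
theorem pv_sum_trunc {M : Type} [AddCommMonoid M] (n k : Nat) (hk : k < n) (f : Nat → M) :
    (∑ i ∈ Finset.range n, if i ≤ k then f i else 0) = ∑ i ∈ Finset.range (k + 1), f i := by
  rw [← Finset.sum_filter]
  congr 1
  ext i
  simp only [Finset.mem_filter, Finset.mem_range]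
  omega

-- contribution count of index k, as it appears in B (Nat division, cast to Int)
def pvC (n k : Nat) : Int := (((k + 1) * (n - k) + 1) / 2 : Nat)

theorem pv_half (L : Nat) : (2 * L + 1) / 2 = L := by omega

-- the closed-form arithmetic behind the count of odd-length windows around k
theorem pv_half2 (L : Nat) : 2 * L / 2 = L := by omega

theorem pv_sum_trunc' {M : Type} [AddCommMonoid M] (n k : Nat) (hk : k ≤ n) (f : Nat → M) :
    (∑ i ∈ Finset.range n, if i < k then f i else 0) = ∑ i ∈ Finset.range k, f i := by
  rw [← Finset.sum_filter]
  congr 1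
  ext i
  simp only [Finset.mem_filter, Finset.mem_range]
  omega

theorem pv_arith (n k e o : Nat) (hk : k < n)
    (he : e + (k + 1) / 2 = (n + 1) / 2) (ho : o + k / 2 = n / 2) :
    (k + 1 + 1) / 2 * e + (k + 1) / 2 * o = ((k + 1) * (n - k) + 1) / 2 := by
  rcases Nat.even_or_odd k with ⟨a, rfl⟩ | ⟨a, rfl⟩ <;>
    rcases Nat.even_or_odd n with ⟨b, rfl⟩ | ⟨b, rfl⟩
  · obtain ⟨c, rfl⟩ : ∃ c, b = a + c + 1 := ⟨b - a - 1, by omega⟩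
    obtain rfl : e = c + 1 := by omega
    obtain rfl : o = c + 1 := by omega
    rw [show (a + a + 1 + 1) / 2 = a + 1 from by omega,
        show (a + a + 1) / 2 = a from by omega,
        show a + c + 1 + (a + c + 1) - (a + a) = 2 * c + 2 from by omega,
        show (a + a + 1) * (2 * c + 2) + 1 = 2 * ((a + 1) * (c + 1) + a * (c + 1)) + 1 from by ring,
        pv_half]
  · obtain ⟨c, rfl⟩ : ∃ c, b = a + c := ⟨b - a, by omega⟩
    obtain rfl : e = c + 1 := by omega
    rw [show o = c from by omega]
    rw [show (a + a + 1 + 1) / 2 = a + 1 from by omega,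
        show (a + a + 1) / 2 = a from by omega,
        show 2 * (a + c) + 1 - (a + a) = 2 * c + 1 from by omega,
        show (a + a + 1) * (2 * c + 1) + 1 = 2 * ((a + 1) * (c + 1) + a * c) from by ring,
        pv_half2]
  · obtain ⟨c, rfl⟩ : ∃ c, b = a + c + 1 := ⟨b - a - 1, by omega⟩
    obtain rfl : o = c + 1 := by omega
    rw [show e = c from by omega]
    rw [show (2 * a + 1 + 1 + 1) / 2 = a + 1 from by omega,
        show (2 * a + 1 + 1) / 2 = a + 1 from by omega,
        show a + c + 1 + (a + c + 1) - (2 * a + 1) = 2 * c + 1 from by omega,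
        show (2 * a + 1 + 1) * (2 * c + 1) + 1 = 2 * ((a + 1) * c + (a + 1) * (c + 1)) + 1 from by
          ring,
        pv_half]
  · obtain ⟨c, rfl⟩ : ∃ c, b = a + c + 1 := ⟨b - a - 1, by omega⟩
    obtain rfl : e = c + 1 := by omega
    obtain rfl : o = c + 1 := by omega
    rw [show (2 * a + 1 + 1 + 1) / 2 = a + 1 from by omega,
        show (2 * a + 1 + 1) / 2 = a + 1 from by omega,
        show 2 * (a + c + 1) + 1 - (2 * a + 1) = 2 * c + 2 from by omega,
        show (2 * a + 1 + 1) * (2 * c + 2) + 1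
            = 2 * ((a + 1) * (c + 1) + (a + 1) * (c + 1)) + 1 from by ring,
        pv_half]

-- the count of pairs (i, j) with i ≤ k ≤ j < n and i ≡ j (mod 2)
theorem pv_count (n k : Nat) (hk : k < n) :
    (∑ i ∈ Finset.range n, ∑ j ∈ Finset.range n,
        if i ≤ k ∧ k ≤ j ∧ (i + j) % 2 = 0 then (1 : Nat) else 0)
      = ((k + 1) * (n - k) + 1) / 2 := by
  have hsplit : ∀ i j : Nat, (if i ≤ k ∧ k ≤ j ∧ (i + j) % 2 = 0 then (1 : Nat) else 0)
      = (if i ≤ k then (if i % 2 = 0 then (1 : Nat) else 0) else 0)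
          * (if k ≤ j then (if j % 2 = 0 then (1 : Nat) else 0) else 0)
        + (if i ≤ k then (if i % 2 = 1 then (1 : Nat) else 0) else 0)
          * (if k ≤ j then (if j % 2 = 1 then (1 : Nat) else 0) else 0) := by
    intro i j; split_ifs <;> omega
  have hc0 : (∑ j ∈ Finset.range n, if k ≤ j then (if j % 2 = 0 then (1 : Nat) else 0) else 0)
      + (k + 1) / 2 = (n + 1) / 2 := by
    have h1 : (∑ j ∈ Finset.range n, if j < k then (if j % 2 = 0 then (1 : Nat) else 0) else 0)
        + (∑ j ∈ Finset.range n, if k ≤ j then (if j % 2 = 0 then (1 : Nat) else 0) else 0)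
        = (n + 1) / 2 := by
      rw [← Finset.sum_add_distrib]
      have h2 : ∀ j ∈ Finset.range n,
          ((if j < k then (if j % 2 = 0 then (1 : Nat) else 0) else 0)
            + (if k ≤ j then (if j % 2 = 0 then (1 : Nat) else 0) else 0))
          = (if j % 2 = 0 then (1 : Nat) else 0) := fun j _ => by split_ifs <;> omega
      rw [Finset.sum_congr rfl h2, pv_ev]
    rw [pv_sum_trunc' n k hk.le (fun j => if j % 2 = 0 then (1 : Nat) else 0), pv_ev] at h1
    omega
  have hc1 : (∑ j ∈ Finset.range n, if k ≤ j then (if j % 2 = 1 then (1 : Nat) else 0) else 0)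
      + k / 2 = n / 2 := by
    have h1 : (∑ j ∈ Finset.range n, if j < k then (if j % 2 = 1 then (1 : Nat) else 0) else 0)
        + (∑ j ∈ Finset.range n, if k ≤ j then (if j % 2 = 1 then (1 : Nat) else 0) else 0)
        = n / 2 := by
      rw [← Finset.sum_add_distrib]
      have h2 : ∀ j ∈ Finset.range n,
          ((if j < k then (if j % 2 = 1 then (1 : Nat) else 0) else 0)
            + (if k ≤ j then (if j % 2 = 1 then (1 : Nat) else 0) else 0))
          = (if j % 2 = 1 then (1 : Nat) else 0) := fun j _ => by split_ifs <;> omega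
      rw [Finset.sum_congr rfl h2, pv_od]
    rw [pv_sum_trunc' n k hk.le (fun j => if j % 2 = 1 then (1 : Nat) else 0), pv_od] at h1
    omega
  calc (∑ i ∈ Finset.range n, ∑ j ∈ Finset.range n,
          if i ≤ k ∧ k ≤ j ∧ (i + j) % 2 = 0 then (1 : Nat) else 0)
      = ∑ i ∈ Finset.range n, ∑ j ∈ Finset.range n,
          ((if i ≤ k then (if i % 2 = 0 then (1 : Nat) else 0) else 0)
              * (if k ≤ j then (if j % 2 = 0 then (1 : Nat) else 0) else 0)
            + (if i ≤ k then (if i % 2 = 1 then (1 : Nat) else 0) else 0)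
              * (if k ≤ j then (if j % 2 = 1 then (1 : Nat) else 0) else 0)) :=
        Finset.sum_congr rfl fun i _ => Finset.sum_congr rfl fun j _ => hsplit i j
    _ = (∑ i ∈ Finset.range n, if i ≤ k then (if i % 2 = 0 then (1 : Nat) else 0) else 0)
          * (∑ j ∈ Finset.range n, if k ≤ j then (if j % 2 = 0 then (1 : Nat) else 0) else 0)
        + (∑ i ∈ Finset.range n, if i ≤ k then (if i % 2 = 1 then (1 : Nat) else 0) else 0)
          * (∑ j ∈ Finset.range n, if k ≤ j then (if j % 2 = 1 then (1 : Nat) else 0) else 0) := by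
        simp only [Finset.sum_add_distrib]
        rw [← Finset.sum_mul_sum, ← Finset.sum_mul_sum]
    _ = ((k + 1) * (n - k) + 1) / 2 := by
        rw [pv_sum_trunc n k hk (fun i => if i % 2 = 0 then (1 : Nat) else 0),
          pv_sum_trunc n k hk (fun i => if i % 2 = 1 then (1 : Nat) else 0), pv_ev, pv_od]
        exact pv_arith n k _ _ hk hc0 hc1

-- a fold over enumerate that adds g of each (index, value) pair
theorem pv_enum_fold (g : Int × Int → Int) : ∀ (xs : List Int) (s a : Int),
    (PySem.List.enumerate xs s).foldl (fun t iv => t + g iv) a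
      = a + ∑ k ∈ Finset.range xs.length, g (s + k, xs.getD k 0) := by
  intro xs
  induction xs with
  | nil => intro s a; simp [PySem.List.enumerate_nil]
  | cons x t ih =>
    intro s a
    rw [PySem.List.enumerate_cons, List.foldl_cons, ih (s + 1) (a + g (s, x)),
      List.length_cons, Finset.sum_range_succ']
    simp only [List.getD_cons_succ, List.getD_cons_zero, Nat.cast_zero, Nat.cast_add,
      Nat.cast_one]
    ring_nf

-- pyRange over a Nat length is the cast of List.range
theorem pv_pyRange_nat (n : Nat) :
    PySem.List.pyRange 0 n 1 = (List.range n).map (fun k : Nat => (k : Int)) := by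
  apply List.ext_getElem
  · simp [PySem.List.length_pyRange_one]
  · intro k h1 h2
    rw [PySem.List.getElem_pyRange_one]
    simp

-- sum of a flatMap, list by list
theorem pv_sum_flatMap {α : Type} (l : List α) (g : α → List Int) :
    (l.flatMap g).sum = (l.map fun x => (g x).sum).sum := by
  induction l <;> simp [*]

-- A's guarded accumulation as init + sum of guarded terms
theorem pv_foldl_spec (cs : List Int) : ∀ (L : List (Int × Int)) (a : Int),
    L.foldl (fun acc p =>
        if p.2 ≥ p.1 ∧ PySem.Int.mod (p.2 - p.1 + 1) 2 ≠ 0 then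
          acc + (PySem.List.pyGetD cs p.2 0 -
                  (if p.1 > 0 then PySem.List.pyGetD cs (p.1 - 1) 0 else 0))
        else acc) a
      = a + (L.map (fun p =>
          if p.2 ≥ p.1 ∧ PySem.Int.mod (p.2 - p.1 + 1) 2 ≠ 0 then
            (PySem.List.pyGetD cs p.2 0 -
              (if p.1 > 0 then PySem.List.pyGetD cs (p.1 - 1) 0 else 0))
          else 0)).sum := by
  intro L
  induction L with
  | nil => intro a; simp
  | cons x l ih =>
    intro a
    rw [List.foldl_cons, List.map_cons, List.sum_cons]
    split_ifs with h h2
    · rw [ih, add_assoc]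
    · rw [ih, add_assoc]
    · rw [ih, zero_add]

-- B as a Finset sum of per-element contributions
theorem pv_alt_eq (arr : List Int) :
    sumOddLengthSubarrays_alt arr = ∑ k ∈ Finset.range arr.length, pvA arr k * pvC arr.length k := by
  simp only [sumOddLengthSubarrays_alt]
  rw [pv_enum_fold (fun iv => iv.2 * PySem.Int.floordiv ((iv.1 + 1) * ((arr.length : Int) - iv.1) + 1) 2) arr 0 0]
  rw [zero_add]
  apply Finset.sum_congr rfl
  intro k hk
  simp only [Finset.mem_range] at hk
  simp only [zero_add, pvA, pvC]
  congr 1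
  rw [show ((k : Int) + 1) * ((arr.length : Int) - k) + 1
        = (((k + 1) * (arr.length - k) + 1 : Nat) : Int) from by
      push_cast [Nat.cast_sub hk.le]; ring]
  exact_mod_cast PySem.Int.floordiv_natCast ((k + 1) * (arr.length - k) + 1) 2

-- difference of prefix sums = guarded window sum
theorem pv_window (arr : List Int) (i j : Nat) (hij : i ≤ j) (hj : j < arr.length) :
    (∑ m ∈ Finset.range (j + 1), pvA arr m) - ∑ m ∈ Finset.range i, pvA arr m
      = ∑ m ∈ Finset.range arr.length, if i ≤ m ∧ m ≤ j then pvA arr m else 0 := by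
  have h1 : (∑ m ∈ Finset.range arr.length, if i ≤ m ∧ m ≤ j then pvA arr m else 0)
      = ∑ m ∈ Finset.range (j + 1), if i ≤ m then pvA arr m else 0 := by
    rw [← pv_sum_trunc arr.length j hj (fun m => if i ≤ m then pvA arr m else 0)]
    apply Finset.sum_congr rfl
    intro m _
    split_ifs <;> omega
  have h2 : (∑ m ∈ Finset.range (j + 1), if i ≤ m then pvA arr m else 0)
      + ∑ m ∈ Finset.range (j + 1), (if m < i then pvA arr m else 0)
      = ∑ m ∈ Finset.range (j + 1), pvA arr m := by
    rw [← Finset.sum_add_distrib]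
    apply Finset.sum_congr rfl
    intro m _
    split_ifs <;> omega
  have h3 : (∑ m ∈ Finset.range (j + 1), if m < i then pvA arr m else 0)
      = ∑ m ∈ Finset.range i, pvA arr m := pv_sum_trunc' (j + 1) i (by omega) _
  rw [h1]
  omega

-- A as a double Finset sum over index pairs
theorem pv_a_eq (arr : List Int) :
    sumOddLengthSubarrays arr
      = ∑ i ∈ Finset.range arr.length, ∑ j ∈ Finset.range arr.length,
          if i ≤ j ∧ (i + j) % 2 = 0 then
            (∑ m ∈ Finset.range (j + 1), pvA arr m) - ∑ m ∈ Finset.range i, pvA arr m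
          else 0 := by
  have hcs : (arr.foldl (fun res v => (res.1 ++ [res.2 + v], res.2 + v))
        (([] : List Int), (0 : Int))).1
      = (List.range arr.length).map (fun k => (arr.take (k + 1)).sum) := by
    rw [pv_cs_eq arr [] 0]
    simp
  simp only [sumOddLengthSubarrays]
  rw [hcs, pv_foldl_spec, zero_add, pv_pyRange_nat]
  rw [List.map_flatMap, pv_sum_flatMap]
  simp only [List.map_map, Function.comp_def]
  rw [pv_sum_map_range]
  apply Finset.sum_congr rfl
  intro i hi
  rw [pv_sum_map_range]
  apply Finset.sum_congr rfl
  intro j hj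
  simp only [Finset.mem_range] at hi hj
  have hmod : PySem.Int.mod ((j : Int) - i + 1) 2 = ((j : Int) - i + 1) % 2 :=
    PySem.Int.mod_eq_emod_of_pos (by norm_num)
  have hcond : ((j : Int) ≥ (i : Int) ∧ PySem.Int.mod ((j : Int) - i + 1) 2 ≠ 0)
      ↔ (i ≤ j ∧ (i + j) % 2 = 0) := by
    rw [hmod]
    omega
  have hT : PySem.List.pyGetD
        ((List.range arr.length).map (fun k => (arr.take (k + 1)).sum)) (j : Int) 0
      = ∑ m ∈ Finset.range (j + 1), pvA arr m := by
    rw [PySem.List.pyGetD_natCast, List.getD_eq_getElem?_getD, List.getElem?_map,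
      List.getElem?_range hj]
    simp [pv_take_sum]
  have hS : (if ((i : Int)) > 0 then PySem.List.pyGetD
        ((List.range arr.length).map (fun k => (arr.take (k + 1)).sum)) ((i : Int) - 1) 0 else 0)
      = ∑ m ∈ Finset.range i, pvA arr m := by
    rcases Nat.eq_zero_or_pos i with rfl | hpos
    · simp
    · rw [if_pos (by exact_mod_cast hpos : ((i : Int)) > 0),
        show ((i : Int) - 1) = ((i - 1 : Nat) : Int) from by omega,
        PySem.List.pyGetD_natCast, List.getD_eq_getElem?_getD, List.getElem?_map,
        List.getElem?_range (by omega : i - 1 < arr.length)]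
      simp [pv_take_sum, show i - 1 + 1 = i from by omega]
  rw [if_congr hcond (by rw [hT, hS]) rfl]

-- the mathematical identity: double sum over odd-length windows = per-element contributions
theorem pv_math (arr : List Int) :
    (∑ i ∈ Finset.range arr.length, ∑ j ∈ Finset.range arr.length,
        if i ≤ j ∧ (i + j) % 2 = 0 then
          (∑ m ∈ Finset.range (j + 1), pvA arr m) - ∑ m ∈ Finset.range i, pvA arr m
        else 0)
      = ∑ k ∈ Finset.range arr.length, pvA arr k * pvC arr.length k := by
  calc (∑ i ∈ Finset.range arr.length, ∑ j ∈ Finset.range arr.length,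
          if i ≤ j ∧ (i + j) % 2 = 0 then
            (∑ m ∈ Finset.range (j + 1), pvA arr m) - ∑ m ∈ Finset.range i, pvA arr m
          else 0)
      = ∑ i ∈ Finset.range arr.length, ∑ j ∈ Finset.range arr.length,
          ∑ m ∈ Finset.range arr.length,
            (if i ≤ m ∧ m ≤ j ∧ (i + j) % 2 = 0 then pvA arr m else 0) := by
        apply Finset.sum_congr rfl
        intro i _
        apply Finset.sum_congr rfl
        intro j hj
        simp only [Finset.mem_range] at hj
        by_cases hc : i ≤ j ∧ (i + j) % 2 = 0
        · rw [if_pos hc, pv_window arr i j hc.1 hj]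
          apply Finset.sum_congr rfl
          intro m _
          have hpar := hc.2
          split_ifs <;> omega
        · rw [if_neg hc]
          symm
          apply Finset.sum_eq_zero
          intro m _
          exact if_neg (by omega)
    _ = ∑ m ∈ Finset.range arr.length, ∑ i ∈ Finset.range arr.length,
          ∑ j ∈ Finset.range arr.length,
            (if i ≤ m ∧ m ≤ j ∧ (i + j) % 2 = 0 then pvA arr m else 0) := by
        have hswap1 : ∀ i ∈ Finset.range arr.length,
            (∑ j ∈ Finset.range arr.length, ∑ m ∈ Finset.range arr.length,
              (if i ≤ m ∧ m ≤ j ∧ (i + j) % 2 = 0 then pvA arr m else 0))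
            = ∑ m ∈ Finset.range arr.length, ∑ j ∈ Finset.range arr.length,
              (if i ≤ m ∧ m ≤ j ∧ (i + j) % 2 = 0 then pvA arr m else 0) :=
          fun i _ => Finset.sum_comm
        rw [Finset.sum_congr rfl hswap1]
        exact Finset.sum_comm
    _ = ∑ m ∈ Finset.range arr.length, pvA arr m
          * ∑ i ∈ Finset.range arr.length, ∑ j ∈ Finset.range arr.length,
              (if i ≤ m ∧ m ≤ j ∧ (i + j) % 2 = 0 then (1 : Int) else 0) := by
        apply Finset.sum_congr rfl
        intro m _
        rw [Finset.mul_sum]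
        apply Finset.sum_congr rfl
        intro i _
        rw [Finset.mul_sum]
        apply Finset.sum_congr rfl
        intro j _
        rw [mul_ite, mul_one, mul_zero]
    _ = ∑ k ∈ Finset.range arr.length, pvA arr k * pvC arr.length k := by
        apply Finset.sum_congr rfl
        intro m hm
        simp only [Finset.mem_range] at hm
        congr 1
        have hcast : (∑ i ∈ Finset.range arr.length, ∑ j ∈ Finset.range arr.length,
              if i ≤ m ∧ m ≤ j ∧ (i + j) % 2 = 0 then (1 : Int) else 0)
            = ((∑ i ∈ Finset.range arr.length, ∑ j ∈ Finset.range arr.length,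
              if i ≤ m ∧ m ≤ j ∧ (i + j) % 2 = 0 then (1 : Nat) else 0 : Nat) : Int) := by
          push_cast
          rfl
        rw [hcast, pv_count arr.length m hm]
        rfl

-- ===== VERDICT (by name: the statement is the Claim_ definition above) =====
theorem sumOddLengthSubarrays_spec : Claim_equal_sumOddLengthSubarrays := by
  intro arr _
  unfold Spec_sumOddLengthSubarrays
  rw [pv_a_eq, pv_math, pv_alt_eq]
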